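-- pv_equiv track=rewrite | github.com/drashtitandelcanvision0128/canberravision | app.py | _select_best_indian_plate_result
-- ===== SOURCE A (Python) =====
-- def _select_best_indian_plate_result(results: list) -> str:
--     """Select the best Indian license plate result from multiple candidates."""
--     if not results:
--         return ""
--
--     if len(results) == 1:
--         return results[0]
--
--     # Score each result based on Indian license plate characteristics
--     scored_results = []
--     for result in results:
--         score = 0
--
--         # Length preference (8-10 characters is typical for Indian plates)
--         if 8 <= len(result) <= 10:
--             score += 4
--         elif 6 <= len(result) <= 12:
--             score += 2
--
--         # Has both letters and numbers
--         has_letter = any(c.isalpha() for c in result)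
--         has_number = any(c.isdigit() for c in result)
--         if has_letter and has_number:
--             score += 3
--
--         # Indian state code pattern (2 letters at start)
--         if len(result) >= 2 and result[:2].isalpha():
--             score += 3
--             # Check if it's a valid Indian state code
--             state_codes = ['AN', 'AP', 'AR', 'AS', 'BR', 'CG', 'CH', 'DD', 'DL', 'DN', 'GA', 'GJ',
--                           'HP', 'HR', 'JH', 'JK', 'KA', 'KL', 'LA', 'LD', 'MH', 'ML', 'MN', 'MP',
--                           'MZ', 'NL', 'OD', 'PB', 'PY', 'RJ', 'SK', 'TN', 'TR', 'TS', 'UK', 'UP', 'WB']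
--             if result[:2] in state_codes:
--                 score += 2
--
--         # Check for typical Indian plate pattern: XX00XX0000
--         if len(result) >= 8:
--             # Pattern: 2 letters + 2 numbers + 2 letters + 4 numbers
--             if (result[:2].isalpha() and len(result) >= 8 and
--                 result[2:4].isdigit() and len(result) >= 6 and
--                 result[4:6].isalpha() and len(result) >= 10 and
--                 result[6:10].isdigit()):
--                 score += 5
--             # More flexible pattern checking
--             elif (result[:2].isalpha() and
--                   any(result[i].isdigit() for i in range(2, min(6, len(result)))) and
--                   any(c.isalpha() for c in result[2:min(8, len(result))])):
--                 score += 3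
--
--         scored_results.append((score, result))
--
--     # Sort by score and return the best
--     scored_results.sort(key=lambda x: x[0], reverse=True)
--     return scored_results[0][1]
-- ===== SOURCE B (Python) =====
-- _STATE_CODES = {'AN', 'AP', 'AR', 'AS', 'BR', 'CG', 'CH', 'DD', 'DL', 'DN', 'GA', 'GJ',
--                 'HP', 'HR', 'JH', 'JK', 'KA', 'KL', 'LA', 'LD', 'MH', 'ML', 'MN', 'MP',
--                 'MZ', 'NL', 'OD', 'PB', 'PY', 'RJ', 'SK', 'TN', 'TR', 'TS', 'UK', 'UP', 'WB'}
--
--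
-- def _plate_score(result: str) -> int:
--     n = len(result)
--     head = result[:2]
--     pts = 4 if 8 <= n <= 10 else (2 if 6 <= n <= 12 else 0)
--     if any(c.isalpha() for c in result) and any(c.isdigit() for c in result):
--         pts += 3
--     if n >= 2 and head.isalpha():
--         pts += 5 if head in _STATE_CODES else 3
--     if n >= 8:
--         if n >= 10 and head.isalpha() and result[2:4].isdigit() and result[4:6].isalpha() and result[6:10].isdigit():
--             pts += 5
--         elif head.isalpha() and any(c.isdigit() for c in result[2:6]) and any(c.isalpha() for c in result[2:8]):
--             pts += 3
--     return pts
--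
--
-- def _select_best_indian_plate_result(results: list) -> str:
--     if not results:
--         return ""
--     return max(results, key=_plate_score)
-- ===== Notes on version B (the rewrite author's own statement) =====
-- stated objective: simpler
-- what changed: The scoring heuristic is factored into a helper (written as a sum of branch contributions) and the build-list/stable-reverse-sort/take-first selection is replacedced by a single max(results, key=score) pass, relying on max's first-maximum tie-break matching the stable sort's.
import Mathlib
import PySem

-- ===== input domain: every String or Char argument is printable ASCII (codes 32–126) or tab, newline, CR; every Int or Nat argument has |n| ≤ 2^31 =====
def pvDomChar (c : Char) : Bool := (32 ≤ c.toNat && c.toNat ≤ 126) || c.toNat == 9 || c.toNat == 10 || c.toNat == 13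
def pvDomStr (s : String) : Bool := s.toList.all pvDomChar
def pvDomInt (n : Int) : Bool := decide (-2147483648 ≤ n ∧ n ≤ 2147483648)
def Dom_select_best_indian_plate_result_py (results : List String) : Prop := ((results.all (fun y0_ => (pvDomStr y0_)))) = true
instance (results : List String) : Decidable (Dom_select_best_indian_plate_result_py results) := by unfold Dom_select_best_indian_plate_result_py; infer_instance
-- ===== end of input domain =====

-- B replaces A's build-scored-list / stable-reverse-sort / take-first selection by a single
-- max-with-key pass over the candidates (same heuristic, factored into a helper): simpler, not faster.

-- shared low-level wrappers: Python s.isalpha()/s.isdigit() on a whole string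
-- (nonempty and all chars pass; exact on the ASCII domain)
def pyStrAllAlpha (cs : List Char) : Bool := !cs.isEmpty && cs.all PySem.Chars.isalpha
def pyStrAllDigit (cs : List Char) : Bool := !cs.isEmpty && cs.all PySem.Chars.isdigit

-- the state_codes literal (shared data)
def stateCodes : List (List Char) :=
  (["AN", "AP", "AR", "AS", "BR", "CG", "CH", "DD", "DL", "DN", "GA", "GJ",
    "HP", "HR", "JH", "JK", "KA", "KL", "LA", "LD", "MH", "ML", "MN", "MP",
    "MZ", "NL", "OD", "PB", "PY", "RJ", "SK", "TN", "TR", "TS", "UK", "UP", "WB"].map String.toList)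

-- ===== PORT A =====
-- A's per-candidate scoring, transliterated step for step (score accumulated by successive lets)
def pyScoreA (result : List Char) : Int :=
  let score : Int := 0
  let score := if 8 ≤ result.length ∧ result.length ≤ 10 then score + 4
               else if 6 ≤ result.length ∧ result.length ≤ 12 then score + 2
               else score
  let has_letter := result.any PySem.Chars.isalpha
  let has_number := result.any PySem.Chars.isdigit
  let score := if has_letter && has_number then score + 3 else score
  let score :=
    if 2 ≤ result.length ∧ pyStrAllAlpha (PySem.List.slice result none (some 2)) then
      let score := score + 3
      if stateCodes.contains (PySem.List.slice result none (some 2)) then score + 2 else score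
    else score
  let score :=
    if 8 ≤ result.length then
      if pyStrAllAlpha (PySem.List.slice result none (some 2)) ∧ 8 ≤ result.length ∧
         pyStrAllDigit (PySem.List.slice result (some 2) (some 4)) ∧ 6 ≤ result.length ∧
         pyStrAllAlpha (PySem.List.slice result (some 4) (some 6)) ∧ 10 ≤ result.length ∧
         pyStrAllDigit (PySem.List.slice result (some 6) (some 10)) then
        score + 5
      else if pyStrAllAlpha (PySem.List.slice result none (some 2)) ∧
              -- any(result[i].isdigit() for i in range(2, min(6, len(result)))): every index is
              -- in range here (i < 6 ≤ len), so the ' ' default of pyGetD is never used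
              (PySem.List.pyRange 2 (min 6 (result.length : Int))).any
                (fun i => PySem.Chars.isdigit (PySem.List.pyGetD result i ' ')) ∧
              (PySem.List.slice result (some 2) (some (min 8 (result.length : Int)))).any PySem.Chars.isalpha then
        score + 3
      else score
    else score
  score

def select_best_indian_plate_result_py (results : List String) : String :=
  if results.isEmpty then ""
  else if results.length = 1 then PySem.List.pyGetD results 0 ""  -- results[0], list nonempty
  else
    let scored := results.foldl (fun acc r => acc ++ [(pyScoreA r.toList, r)]) ([] : List (Int × String))
    let sortedR := PySem.List.sorted scored (fun x => x.1) true
    (PySem.List.pyGetD sortedR 0 ((0 : Int), "")).2  -- scored_results[0][1], list nonempty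

-- ===== PORT B =====
-- B's scoring helper: same heuristic written as a sum of branch contributions
def pyScoreB (result : List Char) : Int :=
  let n := result.length
  let head := PySem.List.slice result none (some 2)
  let pts : Int := if 8 ≤ n ∧ n ≤ 10 then 4 else if 6 ≤ n ∧ n ≤ 12 then 2 else 0
  let pts := pts + (if result.any PySem.Chars.isalpha && result.any PySem.Chars.isdigit then 3 else 0)
  let pts := pts + (if 2 ≤ n ∧ pyStrAllAlpha head then
                      (if stateCodes.contains head then 5 else 3) else 0)
  let pts := pts +
    (if 8 ≤ n then
       if 10 ≤ n ∧ pyStrAllAlpha head ∧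
          pyStrAllDigit (PySem.List.slice result (some 2) (some 4)) ∧
          pyStrAllAlpha (PySem.List.slice result (some 4) (some 6)) ∧
          pyStrAllDigit (PySem.List.slice result (some 6) (some 10)) then 5
       else if pyStrAllAlpha head ∧
               (PySem.List.slice result (some 2) (some 6)).any PySem.Chars.isdigit ∧
               (PySem.List.slice result (some 2) (some 8)).any PySem.Chars.isalpha then 3
       else 0
     else 0)
  pts

def select_best_indian_plate_result_py_alt (results : List String) : String :=
  if results.isEmpty then ""
  else (PySem.List.max? results (fun r => pyScoreB r.toList)).getD ""

-- ===== PRECONDITION & SPEC =====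
def Spec_select_best_indian_plate_result_py (results : List String) (out : String) : Prop := out = select_best_indian_plate_result_py_alt results
instance (results : List String) (out : String) : Decidable (Spec_select_best_indian_plate_result_py results out) := by unfold Spec_select_best_indian_plate_result_py; infer_instance

-- ===== CLAIM (what is proved, stated in full; the proofs are below) =====
def Claim_equal_select_best_indian_plate_result_py : Prop := ∀ (results : List String), Dom_select_best_indian_plate_result_py results → Spec_select_best_indian_plate_result_py results (select_best_indian_plate_result_py results)

-- ===== LEMMAS AND PROOFS =====

-- generic helper: Python's running-max step (match written out so `cases` reduces it)
def maxStep {α : Type} (key : α → Int) (m : Option α) (x : α) : Option α :=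
  match m with | none => some x | some m' => if key m' < key x then some x else some m'

theorem max?_eq_foldl_maxStep {α : Type} (xs : List α) (key : α → Int) :
    PySem.List.max? xs key = xs.foldl (maxStep key) none := by
  unfold PySem.List.max?
  apply List.foldl_ext
  intro m x _
  cases m <;> rfl

theorem aux_head {α : Type} (key : α → Int) :
    ∀ (xs : List α) (acc : List α),
      (xs.foldl (fun a x => PySem.List.insertBy (fun a b => decide (key b < key a)) x a) acc).head?
        = xs.foldl (maxStep key) acc.head? := by
  intro xs
  induction xs with
  | nil => intro acc; rfl
  | cons x t ih =>
    intro acc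
    rw [List.foldl_cons, List.foldl_cons, ih]
    congr 1
    cases acc with
    | nil => simp [PySem.List.insertBy, maxStep]
    | cons h tl =>
      simp only [PySem.List.insertBy, List.head?, maxStep]
      by_cases hlt : key h < key x <;> simp [hlt]

-- head of Python's stable reverse sort is Python's max (first maximal element)
theorem head?_sorted_rev {α : Type} (xs : List α) (key : α → Int) :
    (PySem.List.sorted xs key true).head? = PySem.List.max? xs key := by
  rw [PySem.List.sorted_rev_eq_foldl_insertBy, max?_eq_foldl_maxStep]
  exact aux_head key xs []

def pairOf {α : Type} (key : α → Int) (r : α) : Int × α := (key r, r)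

def maxStepP {α : Type} (key : α → Int) (p : Option (Int × α)) (r : α) : Option (Int × α) :=
  match p with
  | none => some (pairOf key r)
  | some q => if q.1 < key r then some (pairOf key r) else some q

theorem aux_map {α : Type} (key : α → Int) :
    ∀ (xs : List α) (m : Option α),
      xs.foldl (maxStepP key) (Option.map (pairOf key) m)
        = Option.map (pairOf key) (xs.foldl (maxStep key) m) := by
  intro xs
  induction xs with
  | nil => intro m; rfl
  | cons x t ih =>
    intro m
    rw [List.foldl_cons, List.foldl_cons]
    cases m with
    | none => exact ih (some x)
    | some m' =>
      simp only [Option.map_some, maxStepP, maxStep, pairOf]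
      by_cases hlt : key m' < key x <;> simp [hlt] <;> [exact ih (some x); exact ih (some m')]

-- max over the (score, r) pairs keyed by fst is max over r keyed by score
theorem max?_map_pair {α : Type} (xs : List α) (key : α → Int) :
    PySem.List.max? (xs.map (pairOf key)) (fun x => x.1)
      = Option.map (pairOf key) (PySem.List.max? xs key) := by
  rw [max?_eq_foldl_maxStep]
  unfold PySem.List.max?
  rw [List.foldl_map]
  trans (xs.foldl (maxStepP key) none)
  · apply List.foldl_ext
    intro p x _
    cases p <;> rfl
  · exact aux_map key xs none

-- A's per-index digit scan over range(2, 6) equals B's scan of the slice result[2:6]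
theorem flex_any (cs : List Char) (h : 8 ≤ cs.length) :
    ((PySem.List.pyRange 2 6).any (fun i => PySem.Chars.isdigit (PySem.List.pyGetD cs i ' ')))
      = (PySem.List.slice cs (some 2) (some 6)).any PySem.Chars.isdigit := by
  rcases cs with _|⟨a,_|⟨b,_|⟨c,_|⟨d,_|⟨e,_|⟨f,t⟩⟩⟩⟩⟩⟩ <;> simp at h
  simp [PySem.List.pyRange, PySem.List.pyGetD, PySem.List.pyGet?, PySem.List.pyIdx?,
          PySem.List.slice, PySem.List.clampIdx, List.range_succ,
          show (2:Int) ≤ (t.length:Int)+1+1+1+1+1 from by omega,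
          show (3:Int) ≤ (t.length:Int)+1+1+1+1+1 from by omega,
          show (4:Int) ≤ (t.length:Int)+1+1+1+1+1 from by omega,
        show (5:Int) ≤ (t.length:Int)+1+1+1+1+1 from by omega]

theorem ite_add_shape1 (p : Prop) [Decidable p] (x a : Int) :
    (if p then x + a else x) = x + (if p then a else 0) := by
  split_ifs <;> omega

theorem ite_add_shape2 (p : Prop) [Decidable p] (x a b : Int) :
    (if p then x + a else x + b) = x + (if p then a else b) := by
  split_ifs <;> omega

theorem three_add_ite (p : Prop) [Decidable p] :
    ((3:Int) + if p then (2:Int) else 0) = if p then 5 else 3 := by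
  split_ifs <;> omega

-- the two scoring functions agree on every candidate
theorem score_eq (cs : List Char) : pyScoreA cs = pyScoreB cs := by
  by_cases h8 : 8 ≤ cs.length
  · have hm6 : min (6:Int) (cs.length:Int) = 6 := by omega
    have hm8 : min (8:Int) (cs.length:Int) = 8 := by omega
    have hpat : ((pyStrAllAlpha (PySem.List.slice cs none (some 2)) = true) ∧ 8 ≤ cs.length ∧
         (pyStrAllDigit (PySem.List.slice cs (some 2) (some 4)) = true) ∧ 6 ≤ cs.length ∧
         (pyStrAllAlpha (PySem.List.slice cs (some 4) (some 6)) = true) ∧ 10 ≤ cs.length ∧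
         (pyStrAllDigit (PySem.List.slice cs (some 6) (some 10)) = true))
        ↔ (10 ≤ cs.length ∧ (pyStrAllAlpha (PySem.List.slice cs none (some 2)) = true) ∧
           (pyStrAllDigit (PySem.List.slice cs (some 2) (some 4)) = true) ∧
           (pyStrAllAlpha (PySem.List.slice cs (some 4) (some 6)) = true) ∧
           (pyStrAllDigit (PySem.List.slice cs (some 6) (some 10)) = true)) := by
      constructor
      · rintro ⟨h1, _, h3, _, h5, h6, h7⟩; exact ⟨h6, h1, h3, h5, h7⟩
      · rintro ⟨h1, h2, h3, h4, h5⟩; exact ⟨h2, by omega, h3, by omega, h4, h1, h5⟩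
    simp only [pyScoreA, pyScoreB, hm6, hm8, flex_any cs h8, hpat, zero_add,
               ite_add_shape1, ite_add_shape2, add_assoc, three_add_ite]
  · simp only [pyScoreA, pyScoreB, if_neg h8, zero_add,
               ite_add_shape1, ite_add_shape2, add_assoc, add_zero, three_add_ite]

-- ===== VERDICT (by name: the statement is the Claim_ definition above) =====
theorem select_best_indian_plate_result_py_spec : Claim_equal_select_best_indian_plate_result_py := by
  intro results _
  unfold Spec_select_best_indian_plate_result_py
  cases results with
  | nil => rfl
  | cons r rs =>
    cases rs with
    | nil =>
      simp [select_best_indian_plate_result_py, select_best_indian_plate_result_py_alt,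
            PySem.List.pyGetD, PySem.List.pyGet?, PySem.List.pyIdx?, PySem.List.max?]
    | cons r2 t =>
      have hkey : (fun r : String => (pyScoreA r.toList, r)) = pairOf (fun r : String => pyScoreB r.toList) := by
        funext r
        simp [pairOf, score_eq]
      have hlen : (r :: r2 :: t).length ≠ 1 := by simp
      have hscored : (r :: r2 :: t).foldl (fun acc s => acc ++ [(pyScoreA s.toList, s)]) ([] : List (Int × String))
          = (r :: r2 :: t).map (pairOf (fun s : String => pyScoreB s.toList)) := by
        rw [PySem.List.foldl_append_singleton_eq_map (fun s : String => (pyScoreA s.toList, s)), hkey]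
        simp
      obtain ⟨m, hm⟩ : ∃ m, PySem.List.max? (r :: r2 :: t) (fun s : String => pyScoreB s.toList) = some m := by
        cases hcase : PySem.List.max? (r :: r2 :: t) (fun s : String => pyScoreB s.toList) with
        | none => exact absurd ((PySem.List.max?_eq_none_iff _ _).mp hcase) (by simp)
        | some m => exact ⟨m, rfl⟩
      have hhead : (PySem.List.sorted ((r :: r2 :: t).map (pairOf (fun s : String => pyScoreB s.toList)))
          (fun x => x.1) true).head? = some (pairOf (fun s : String => pyScoreB s.toList) m) := by
        rw [head?_sorted_rev, max?_map_pair, hm]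
        rfl
      simp only [select_best_indian_plate_result_py, select_best_indian_plate_result_py_alt,
                 List.isEmpty_cons, if_neg hlen, hscored, hm]
      cases hs : PySem.List.sorted ((r :: r2 :: t).map (pairOf (fun s : String => pyScoreB s.toList)))
          (fun x => x.1) true with
      | nil => rw [hs] at hhead; simp at hhead
      | cons p l =>
        rw [hs] at hhead
        simp only [List.head?] at hhead
        cases hhead
        simp [PySem.List.pyGetD, PySem.List.pyGet?, PySem.List.pyIdx?, pairOf]
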